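-- pv_equiv track=rewrite | github.com/aguemoug/sqlite-orm-cpp | parser.py | combine_header_with_file
-- ===== SOURCE A (Python) =====
-- MACRO = """
-- #ifdef __CODE_GENERATOR__
-- #define TABLE(name) __attribute__((annotate("table:" #name)))
-- #define VIEW(name) __attribute__((annotate("view:" #name)))
-- #define IGNORE __attribute__((annotate("ignore")))
-- #define PK __attribute__((annotate("pk")))
-- #define FK __attribute__((annotate("fk")))
-- #define AUTOINC __attribute__((annotate("autoinc")))
-- #define READONLY __attribute__((annotate("readonly")))
-- #define WIDTH(w) __attribute__((annotate("width:" #w)))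
-- #else
-- #define TABLE(name)
-- #define VIEW(name)
-- #define IGNORE
-- #define PK
-- #define FK
-- #define AUTOINC
-- #define READONLY
-- #define WIDTH(w)
-- #endif
-- """
--
-- def combine_header_with_file(original_content: str) -> str:
--     lines = original_content.split("\n")
--     injection_point = 0
--
--     # Find the last include statement or start of file
--     for i, line in enumerate(lines):
--         if line.strip().startswith("#include"):
--             injection_point = i + 1
--         elif line.strip() and not line.strip().startswith("#"):
--             # Found non-preprocessor code, stop here
--             break
--     # Inject the ORM header include
--
--     lines.insert(injection_point, f"// Injected ORM header content\n{MACRO}")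
--     combined_content = "\n".join(lines)
--     return combined_content
-- ===== SOURCE B (Python) =====
-- MACRO = """
-- #ifdef __CODE_GENERATOR__
-- #define TABLE(name) __attribute__((annotate("table:" #name)))
-- #define VIEW(name) __attribute__((annotate("view:" #name)))
-- #define IGNORE __attribute__((annotate("ignore")))
-- #define PK __attribute__((annotate("pk")))
-- #define FK __attribute__((annotate("fk")))
-- #define AUTOINC __attribute__((annotate("autoinc")))
-- #define READONLY __attribute__((annotate("readonly")))
-- #define WIDTH(w) __attribute__((annotate("width:" #w)))
-- #else
-- #define TABLE(name)
-- #define VIEW(name)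
-- #define IGNORE
-- #define PK
-- #define FK
-- #define AUTOINC
-- #define READONLY
-- #define WIDTH(w)
-- #endif
-- """
--
-- def combine_header_with_file(original_content: str) -> str:
--     lines = original_content.split("\n")
--     # pass 1: cutoff = index of the first real code line (non-blank, not a '#' directive)
--     cutoff = len(lines)
--     for i, line in enumerate(lines):
--         s = line.strip()
--         if s and not s.startswith("#"):
--             cutoff = i
--             break
--     # pass 2: last '#include' strictly before the cutoff, scanned back-to-front
--     injection_point = 0
--     for k, line in enumerate(reversed(lines[:cutoff])):
--         if line.strip().startswith("#include"):
--             injection_point = cutoff - k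
--             break
--     lines.insert(injection_point, f"// Injected ORM header content\n{MACRO}")
--     return "\n".join(lines)
-- ===== Notes on version B (the rewrite author's own statement) =====
-- stated objective: alternative
-- what changed: Replaces A's single forward scan that tracks the last-seen include directive with a break, by two passes: first compute the cutoff (the first real code line), then scan the prefix before it back-to-front for the last include directive.
import Mathlib
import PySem

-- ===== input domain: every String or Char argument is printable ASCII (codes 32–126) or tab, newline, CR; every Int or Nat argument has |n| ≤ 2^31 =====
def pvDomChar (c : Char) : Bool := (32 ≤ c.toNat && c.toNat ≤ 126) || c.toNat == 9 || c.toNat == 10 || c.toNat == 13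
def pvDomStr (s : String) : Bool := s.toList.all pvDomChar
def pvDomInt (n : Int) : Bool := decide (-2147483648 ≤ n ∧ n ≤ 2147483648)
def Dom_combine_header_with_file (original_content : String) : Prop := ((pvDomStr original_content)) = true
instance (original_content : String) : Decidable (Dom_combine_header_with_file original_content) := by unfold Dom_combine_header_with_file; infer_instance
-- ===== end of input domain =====

-- B replaces A's single forward scan (tracking the last include, with a break) by two passes:
-- compute the cutoff (first real code line), then scan the prefix before it back-to-front
-- for the last '#include'. Alternative decomposition, same cost.

def pvMacro : String := "\n#ifdef __CODE_GENERATOR__\n#define TABLE(name) __attribute__((annotate(\"table:\" #name)))\n#define VIEW(name) __attribute__((annotate(\"view:\" #name)))\n#define IGNORE __attribute__((annotate(\"ignore\")))\n#define PK __attribute__((annotate(\"pk\")))\n#define FK __attribute__((annotate(\"fk\")))\n#define AUTOINC __attribute__((annotate(\"autoinc\")))\n#define READONLY __attribute__((annotate(\"readonly\")))\n#define WIDTH(w) __attribute__((annotate(\"width:\" #w)))\n#else\n#define TABLE(name)\n#define VIEW(name)\n#define IGNORE\n#define PK\n#define FK\n#define AUTOINC\n#define READONLY\n#define WIDTH(w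)\n#endif\n"

def pvInjected : String := "// Injected ORM header content\n" ++ pvMacro

-- ===== PORT A =====
-- A's for-loop with break: i is the enumerate counter, ip the running injection_point
def pvALoop : List String → Nat → Nat → Nat
  | [], _, ip => ip
  | l :: rest, i, ip =>
    if PySem.Str.startswith (PySem.Str.strip l) "#include" then
      pvALoop rest (i + 1) (i + 1)
    else if (PySem.Str.strip l != "") && !(PySem.Str.startswith (PySem.Str.strip l) "#") then
      ip  -- break
    else
      pvALoop rest (i + 1) ip

def combine_header_with_file (original_content : String) : String :=
  let lines := (PySem.Str.split? original_content "\n").getD []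
  let injection_point := pvALoop lines 0 0
  PySem.Str.join "\n" (PySem.List.insert lines (injection_point : Int) pvInjected)

-- ===== PORT B =====
def pvIsCode (l : String) : Bool :=
  (PySem.Str.strip l != "") && !(PySem.Str.startswith (PySem.Str.strip l) "#")

def pvIsInclude (l : String) : Bool :=
  PySem.Str.startswith (PySem.Str.strip l) "#include"

def combine_header_with_file_alt (original_content : String) : String :=
  let lines := (PySem.Str.split? original_content "\n").getD []
  -- pass 1: cutoff = index of the first real code line, default len(lines)
  let cutoff := lines.findIdx pvIsCode
  -- pass 2: last '#include' strictly before the cutoff, scanned back-to-front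
  let injection_point :=
    match List.findIdx? pvIsInclude ((lines.take cutoff).reverse) with
    | some k => cutoff - k
    | none => 0
  PySem.Str.join "\n" (PySem.List.insert lines (injection_point : Int) pvInjected)

-- ===== PRECONDITION & SPEC =====
def Spec_combine_header_with_file (original_content : String) (out : String) : Prop := out = combine_header_with_file_alt original_content
instance (original_content : String) (out : String) : Decidable (Spec_combine_header_with_file original_content out) := by unfold Spec_combine_header_with_file; infer_instance

-- ===== CLAIM (what is proved, stated in full; the proofs are below) =====
def Claim_equal_combine_header_with_file : Prop := ∀ (original_content : String), Dom_combine_header_with_file original_content → Spec_combine_header_with_file original_content (combine_header_with_file original_content)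

-- ===== LEMMAS AND PROOFS =====

theorem pvHash_of_include {l : String} (h : pvIsInclude l = true) :
    PySem.Str.startswith (PySem.Str.strip l) "#" = true := by
  unfold pvIsInclude at h
  rw [PySem.Str.startswith_eq] at h ⊢
  rw [PySem.Chars.startswith_iff] at h ⊢
  exact List.IsPrefix.trans (by decide) h

theorem pvIsCode_of_include {l : String} (h : pvIsInclude l = true) : pvIsCode l = false := by
  have h1 := pvHash_of_include h
  simp only [PySem.Str.startswith_eq, PySem.Str.toList_strip] at h1
  unfold pvIsCode
  simp only [Bool.and_eq_false_iff, Bool.not_eq_false']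
  exact Or.inr (by simpa using h1)

theorem pvALoop_eq (ls : List String) (i ip : Nat) :
    pvALoop ls i ip =
      (((ls.take (ls.findIdx pvIsCode)).reverse.findIdx? pvIsInclude).map
        (fun k => i + ls.findIdx pvIsCode - k)).getD ip := by
  induction ls generalizing i ip with
  | nil => simp [pvALoop]
  | cons l rest IH =>
    have hlen : (rest.take (rest.findIdx pvIsCode)).reverse.length = rest.findIdx pvIsCode := by
      simp [List.findIdx_le_length]
    by_cases hinc : pvIsInclude l = true
    · have hcode : pvIsCode l = false := pvIsCode_of_include hinc
      have hloop : pvALoop (l :: rest) i ip = pvALoop rest (i + 1) (i + 1) := by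
        rw [pvALoop, if_pos (show PySem.Str.startswith (PySem.Str.strip l) "#include" = true from hinc)]
      rw [hloop, IH]
      rw [List.findIdx_cons]
      simp only [hcode, cond_false, List.take_succ_cons, List.reverse_cons,
        List.findIdx?_append]
      rcases hfi : List.findIdx? pvIsInclude ((rest.take (rest.findIdx pvIsCode)).reverse) with _ | k
      · simp [List.findIdx?_cons, hinc, hlen]
        omega
      · have hk := (List.findIdx?_eq_some_iff_findIdx_eq.mp hfi).1
        simp only [hlen] at hk
        simp
        omega
    · have hinc' : ¬ (PySem.Str.startswith (PySem.Str.strip l) "#include" = true) := hinc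
      by_cases hcode : pvIsCode l = true
      · have hloop : pvALoop (l :: rest) i ip = ip := by
          rw [pvALoop, if_neg hinc', if_pos (show ((PySem.Str.strip l != "") && !(PySem.Str.startswith (PySem.Str.strip l) "#")) = true from hcode)]
        rw [hloop, List.findIdx_cons]
        simp [hcode]
      · have hcode' : pvIsCode l = false := by simpa using hcode
        have hloop : pvALoop (l :: rest) i ip = pvALoop rest (i + 1) ip := by
          rw [pvALoop, if_neg hinc', if_neg (show ¬ ((PySem.Str.strip l != "") && !(PySem.Str.startswith (PySem.Str.strip l) "#")) = true from hcode)]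
        rw [hloop, IH, List.findIdx_cons]
        simp only [hcode', cond_false, List.take_succ_cons, List.reverse_cons,
          List.findIdx?_append]
        rcases hfi : List.findIdx? pvIsInclude ((rest.take (rest.findIdx pvIsCode)).reverse) with _ | k
        · have hincF : pvIsInclude l = false := by simpa using hinc
          simp [List.findIdx?_cons, hincF]
        · simp
          omega

theorem pvIP (lines : List String) :
    ((pvALoop lines 0 0 : Nat) : Int) =
      (match List.findIdx? pvIsInclude ((lines.take (lines.findIdx pvIsCode)).reverse) with
       | some k => ((lines.findIdx pvIsCode : Nat) : Int) - (k : Int)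
       | none => 0) := by
  rw [pvALoop_eq]
  rcases hfi : List.findIdx? pvIsInclude ((lines.take (lines.findIdx pvIsCode)).reverse) with _ | k
  · show ((0 : Nat) : Int) = (0 : Int)
    simp
  · have hk := (List.findIdx?_eq_some_iff_findIdx_eq.mp hfi).1
    simp only [List.length_reverse, List.length_take] at hk
    show ((0 + lines.findIdx pvIsCode - k : Nat) : Int) = ((lines.findIdx pvIsCode : Nat) : Int) - (k : Int)
    omega

-- ===== VERDICT (by name: the statement is the Claim_ definition above) =====
theorem combine_header_with_file_spec : Claim_equal_combine_header_with_file := by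
  intro s _
  unfold Spec_combine_header_with_file combine_header_with_file combine_header_with_file_alt
  dsimp only
  rw [pvIP]
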